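-- pv_equiv track=rewrite | github.com/Alwaleed-7/DSI_manga_recommender | app.py | is_spinoff
-- ===== SOURCE A (Python) =====
-- def is_spinoff(title, input_titles):
--     """
--     Check if a title is a spin-off of any of the input titles
--     """
--     title = title.lower()
--     for input_title in input_titles:
--         input_title = input_title.lower()
--         # Check for common spin-off patterns
--         patterns = [
--             f"{input_title}:",
--             f"{input_title} -",
--             f"{input_title} (",
--             f"{input_title} ~",
--             f"{input_title} gaiden",
--             f"{input_title} side story",
--             f"{input_title} spin-off"
--         ]
--         if any(pattern in title for pattern in patterns):
--             return True
--     return False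
-- ===== SOURCE B (Python) =====
-- _MARKERS = (":", " -", " (", " ~", " gaiden", " side story", " spin-off")
--
-- def is_spinoff(title, input_titles):
--     """
--     Check if a title is a spin-off of any of the input titles
--     """
--     t = title.lower()
--     for input_title in input_titles:
--         p = input_title.lower()
--         i = t.find(p)
--         while i != -1:
--             if t.startswith(_MARKERS, i + len(p)):
--                 return True
--             i = t.find(p, i + 1)
--     return False
-- ===== Notes on version B (the rewrite author's own statement) =====
-- stated objective: alternative
-- what changed: Instead of building seven full pattern strings per input title and running a separate substring search for each, B runs a single find-loop over the occurrences of the lowered input title in the lowered title and checks the seven markers with one startswith at each occurrence.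
import Mathlib
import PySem

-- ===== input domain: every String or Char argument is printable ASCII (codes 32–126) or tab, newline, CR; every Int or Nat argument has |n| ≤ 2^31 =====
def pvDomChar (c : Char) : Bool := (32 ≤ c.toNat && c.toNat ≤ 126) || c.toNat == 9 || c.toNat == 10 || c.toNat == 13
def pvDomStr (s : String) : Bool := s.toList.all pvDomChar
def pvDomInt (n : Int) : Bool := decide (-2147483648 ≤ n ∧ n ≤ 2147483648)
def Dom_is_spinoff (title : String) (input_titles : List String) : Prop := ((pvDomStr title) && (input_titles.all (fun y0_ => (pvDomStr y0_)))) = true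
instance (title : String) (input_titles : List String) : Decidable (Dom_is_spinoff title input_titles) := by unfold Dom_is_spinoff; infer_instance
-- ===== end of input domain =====

-- B replaces A's seven per-title pattern-string substring searches by one find-loop over the
-- occurrences of the input title, checking the seven markers at each occurrence (same result).


-- ===== PORT A =====
-- literal transliteration: lower the title, and for each input title build the seven
-- pattern strings and test each with 'in' (early return = List.any).
def is_spinoff (title : String) (input_titles : List String) : Bool :=
  let t := PySem.Chars.lower title.toList
  input_titles.any (fun input_title =>
    let p := PySem.Chars.lower input_title.toList
    let patterns : List (List Char) :=
      [p ++ [':'], p ++ [' ', '-'], p ++ [' ', '('], p ++ [' ', '~'],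
       p ++ [' ', 'g', 'a', 'i', 'd', 'e', 'n'],
       p ++ [' ', 's', 'i', 'd', 'e', ' ', 's', 't', 'o', 'r', 'y'],
       p ++ [' ', 's', 'p', 'i', 'n', '-', 'o', 'f', 'f']]
    patterns.any (fun pattern => PySem.Chars.isIn pattern t))

-- ===== PORT B =====
def pvMarkers : List (List Char) :=
  [[':'], [' ', '-'], [' ', '('], [' ', '~'],
   [' ', 'g', 'a', 'i', 'd', 'e', 'n'],
   [' ', 's', 'i', 'd', 'e', ' ', 's', 't', 'o', 'r', 'y'],
   [' ', 's', 'p', 'i', 'n', '-', 'o', 'f', 'f']]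

-- the while-loop of Source B; the Nat argument is fuel that only makes the recursion structural
-- (t.length + 2 steps always suffice: each t.find(p, i+1) result is > i or -1);
-- t.startswith(sub, j) for 0 ≤ j is 'sub is a prefix of t.drop j'
def pvFindLoop (t p : List Char) : Nat → Int → Bool
  | 0, _ => false
  | fuel + 1, i =>
    if i ≠ -1 then
      if pvMarkers.any (fun m => m.isPrefixOf (t.drop (i.toNat + p.length))) then true
      else pvFindLoop t p fuel (PySem.Chars.findFrom t p (i + 1) none)
    else false

def is_spinoff_alt (title : String) (input_titles : List String) : Bool :=
  let t := PySem.Chars.lower title.toList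
  input_titles.any (fun input_title =>
    let p := PySem.Chars.lower input_title.toList
    pvFindLoop t p (t.length + 2) (PySem.Chars.find t p))

-- ===== PRECONDITION & SPEC =====
def Spec_is_spinoff (title : String) (input_titles : List String) (out : Bool) : Prop := out = is_spinoff_alt title input_titles
instance (title : String) (input_titles : List String) (out : Bool) : Decidable (Spec_is_spinoff title input_titles out) := by unfold Spec_is_spinoff; infer_instance

-- ===== CLAIM (what is proved, stated in full; the proofs are below) =====
def Claim_equal_is_spinoff : Prop := ∀ (title : String) (input_titles : List String), Dom_is_spinoff title input_titles → Spec_is_spinoff title input_titles (is_spinoff title input_titles)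

-- ===== LEMMAS AND PROOFS =====

-- "p occurs at j followed by one of the markers"
def pvOcc (t p : List Char) (j : Nat) : Prop :=
  p <+: t.drop j ∧ ∃ m ∈ pvMarkers, m <+: t.drop (j + p.length)

-- (p ++ m) is a prefix of s iff p is and m follows right after
theorem pv_prefix_split (p m s : List Char) :
    (p ++ m) <+: s ↔ p <+: s ∧ m <+: s.drop p.length := by
  constructor
  · rintro ⟨r, rfl⟩
    refine ⟨⟨m ++ r, by simp⟩, ?_⟩
    rw [List.append_assoc, List.drop_left]
    exact ⟨r, rfl⟩
  · rintro ⟨⟨u, rfl⟩, hm⟩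
    rw [List.drop_left] at hm
    obtain ⟨r, rfl⟩ := hm
    exact ⟨r, by simp⟩

theorem pv_infix_iff (x t : List Char) : x <:+: t ↔ ∃ j : Nat, x <+: t.drop j := by
  constructor
  · rintro ⟨u, v, rfl⟩
    exact ⟨u.length, by simpa using List.prefix_append x v⟩
  · rintro ⟨j, hx⟩
    exact hx.isInfix.trans (List.drop_subset j t |> fun _ => (t.drop_suffix j).isInfix)

theorem pv_markers_ne_nil : ∀ m ∈ pvMarkers, m ≠ [] := by decide

theorem pv_loop_neg_one (t p : List Char) (f : Nat) : pvFindLoop t p f (-1) = false := by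
  cases f <;> simp [pvFindLoop]

-- CPython quirk: a start past len(s) gives -1
theorem pv_findFrom_past (s sub : List Char) (k : Nat) (hk : s.length < k) :
    PySem.Chars.findFrom s sub (k : Int) none = -1 := by
  unfold PySem.Chars.findFrom
  simp only []
  split_ifs <;> omega

-- the find-loop starting at an occurrence i finds exactly the marked occurrences ≥ i
theorem pv_loop_iff (t p : List Char) : ∀ (fuel : Nat) (i : Nat), i ≤ t.length →
    p <+: t.drop i → t.length - i < fuel →
    (pvFindLoop t p fuel (i : Int) = true ↔ ∃ j, i ≤ j ∧ pvOcc t p j) := by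
  intro fuel
  induction fuel with
  | zero => intro i _ _ hf; omega
  | succ f ih =>
    intro i hi hocc hf
    rw [pvFindLoop, if_pos (show ((i : Int) ≠ -1) by omega)]
    by_cases hm : (pvMarkers.any fun m => m.isPrefixOf (t.drop ((i : Int).toNat + p.length))) = true
    · rw [if_pos hm]
      simp only [Int.toNat_natCast, List.any_eq_true, List.isPrefixOf_iff_prefix] at hm
      exact iff_of_true rfl ⟨i, le_refl i, hocc, hm⟩
    · rw [if_neg hm]
      simp only [Int.toNat_natCast, List.any_eq_true, List.isPrefixOf_iff_prefix] at hm
      push_neg at hm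
      have hcast : (i : Int) + 1 = ((i + 1 : Nat) : Int) := by push_cast; ring
      rw [hcast]
      rcases Nat.lt_or_ge t.length (i + 1) with hpast | hk
      · -- i = t.length: the next find is -1, and no marked occurrence ≥ i exists
        rw [pv_findFrom_past t p (i + 1) hpast, pv_loop_neg_one]
        refine iff_of_false (by simp) ?_
        rintro ⟨j, hij, hpj, m, hmm, hmj⟩
        have hieq : i = t.length := by omega
        rcases Nat.eq_or_lt_of_le hij with rfl | hjgt
        · exact absurd hmj (hm m hmm)
        · have : t.drop (j + p.length) = [] := List.drop_eq_nil_of_le (by omega)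
          rw [this] at hmj
          exact pv_markers_ne_nil m hmm (List.prefix_nil.mp hmj)
      · -- i + 1 ≤ t.length: rewrite findFrom through find on the dropped suffix
        rw [PySem.Chars.findFrom_natCast t p (i + 1) hk]
        by_cases hr : PySem.Chars.find (t.drop (i + 1)) p = -1
        · rw [if_pos hr, pv_loop_neg_one]
          refine iff_of_false (by simp) ?_
          rw [PySem.Chars.find_eq_neg_one_iff] at hr
          rintro ⟨j, hij, hpj, m, hmm, hmj⟩
          rcases Nat.eq_or_lt_of_le hij with rfl | hjgt
          · exact absurd hmj (hm m hmm)
          · refine hr ((pv_infix_iff p (t.drop (i + 1))).mpr ⟨j - (i + 1), ?_⟩)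
            rw [List.drop_drop, show i + 1 + (j - (i + 1)) = j from by omega]
            exact hpj
        · rw [if_neg hr]
          have hr0 : 0 ≤ PySem.Chars.find (t.drop (i + 1)) p := by
            have := PySem.Chars.neg_one_le_find (t.drop (i + 1)) p
            omega
          obtain ⟨hfp, hfmin⟩ := PySem.Chars.find_spec hr0
          have hrlen : PySem.Chars.find (t.drop (i + 1)) p ≤ ((t.drop (i + 1)).length : Int) :=
            PySem.Chars.find_le_length _ _
          have hcast2 : ((i + 1 : Nat) : Int) + PySem.Chars.find (t.drop (i + 1)) p
              = ((i + 1 + (PySem.Chars.find (t.drop (i + 1)) p).toNat : Nat) : Int) := by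
            push_cast [Int.toNat_of_nonneg hr0]; ring
          rw [hcast2]
          set r : Nat := (PySem.Chars.find (t.drop (i + 1)) p).toNat with hrdef
          have hlen' : (t.drop (i + 1)).length = t.length - (i + 1) := by
            simp [List.length_drop]
          have hnxlen : i + 1 + r ≤ t.length := by omega
          have hnxocc : p <+: t.drop (i + 1 + r) := by
            have h := hfp
            rwa [List.drop_drop] at h
          rw [ih (i + 1 + r) hnxlen hnxocc (by omega)]
          constructor
          · rintro ⟨j, hij, hj⟩
            exact ⟨j, by omega, hj⟩
          · rintro ⟨j, hij, hpj, m, hmm, hmj⟩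
            refine ⟨j, ?_, hpj, m, hmm, hmj⟩
            by_contra hlt
            push_neg at hlt
            rcases Nat.eq_or_lt_of_le hij with rfl | hjgt
            · exact (hm m hmm) hmj
            · have hq : j - (i + 1) < r := by omega
              have := hfmin (j - (i + 1)) hq
              apply this
              rw [List.drop_drop, show i + 1 + (j - (i + 1)) = j from by omega]
              exact hpj

-- per input title: A's seven-pattern test and B's find-loop are both "some marked occurrence exists"
theorem pv_A_iff (t p : List Char) :
    (([p ++ [':'], p ++ [' ', '-'], p ++ [' ', '('], p ++ [' ', '~'],
       p ++ [' ', 'g', 'a', 'i', 'd', 'e', 'n'],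
       p ++ [' ', 's', 'i', 'd', 'e', ' ', 's', 't', 'o', 'r', 'y'],
       p ++ [' ', 's', 'p', 'i', 'n', '-', 'o', 'f', 'f']] : List (List Char)).any
        (fun pattern => PySem.Chars.isIn pattern t) = true ↔ ∃ j, pvOcc t p j) := by
  have hpat : ∀ x, (x ∈ ([p ++ [':'], p ++ [' ', '-'], p ++ [' ', '('], p ++ [' ', '~'],
       p ++ [' ', 'g', 'a', 'i', 'd', 'e', 'n'],
       p ++ [' ', 's', 'i', 'd', 'e', ' ', 's', 't', 'o', 'r', 'y'],
       p ++ [' ', 's', 'p', 'i', 'n', '-', 'o', 'f', 'f']] : List (List Char))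
      ↔ ∃ m ∈ pvMarkers, x = p ++ m) := by
    intro x
    simp [pvMarkers]
  rw [List.any_eq_true]
  constructor
  · rintro ⟨x, hx, hin⟩
    obtain ⟨m, hmm, rfl⟩ := (hpat x).mp hx
    obtain ⟨j, hj⟩ := (pv_infix_iff _ t).mp (PySem.Chars.isIn_iff_infix _ _ |>.mp hin)
    obtain ⟨h1, h2⟩ := (pv_prefix_split p m (t.drop j)).mp hj
    rw [List.drop_drop] at h2
    exact ⟨j, h1, m, hmm, h2⟩
  · rintro ⟨j, h1, m, hmm, h2⟩
    refine ⟨p ++ m, (hpat _).mpr ⟨m, hmm, rfl⟩, ?_⟩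
    rw [PySem.Chars.isIn_iff_infix, pv_infix_iff]
    refine ⟨j, (pv_prefix_split p m (t.drop j)).mpr ⟨h1, ?_⟩⟩
    rw [List.drop_drop]
    exact h2

theorem pv_B_iff (t p : List Char) :
    (pvFindLoop t p (t.length + 2) (PySem.Chars.find t p) = true ↔ ∃ j, pvOcc t p j) := by
  by_cases h : PySem.Chars.find t p = -1
  · rw [h, pv_loop_neg_one]
    refine iff_of_false (by simp) ?_
    rw [PySem.Chars.find_eq_neg_one_iff] at h
    rintro ⟨j, h1, _⟩
    exact h ((pv_infix_iff p t).mpr ⟨j, h1⟩)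
  · have h0 : 0 ≤ PySem.Chars.find t p := by
      have := PySem.Chars.neg_one_le_find t p
      omega
    obtain ⟨hfp, hfmin⟩ := PySem.Chars.find_spec h0
    have hlen : PySem.Chars.find t p ≤ (t.length : Int) := PySem.Chars.find_le_length _ _
    have hcast : PySem.Chars.find t p = (((PySem.Chars.find t p).toNat : Nat) : Int) := by
      rw [Int.toNat_of_nonneg h0]
    rw [hcast, pv_loop_iff t p (t.length + 2) (PySem.Chars.find t p).toNat (by omega) hfp
      (by omega)]
    constructor
    · rintro ⟨j, _, hj⟩
      exact ⟨j, hj⟩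
    · rintro ⟨j, h1, h2⟩
      refine ⟨j, ?_, h1, h2⟩
      by_contra hlt
      push_neg at hlt
      exact hfmin j hlt h1

-- ===== VERDICT (by name: the statement is the Claim_ definition above) =====
theorem is_spinoff_spec : Claim_equal_is_spinoff := by
  intro title input_titles _
  unfold Spec_is_spinoff is_spinoff is_spinoff_alt
  simp only []
  have h : ∀ input_title : String,
      (let p := PySem.Chars.lower input_title.toList
       ([p ++ [':'], p ++ [' ', '-'], p ++ [' ', '('], p ++ [' ', '~'],
         p ++ [' ', 'g', 'a', 'i', 'd', 'e', 'n'],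
         p ++ [' ', 's', 'i', 'd', 'e', ' ', 's', 't', 'o', 'r', 'y'],
         p ++ [' ', 's', 'p', 'i', 'n', '-', 'o', 'f', 'f']] : List (List Char)).any
          (fun pattern => PySem.Chars.isIn pattern (PySem.Chars.lower title.toList)))
      = pvFindLoop (PySem.Chars.lower title.toList) (PySem.Chars.lower input_title.toList)
          ((PySem.Chars.lower title.toList).length + 2)
          (PySem.Chars.find (PySem.Chars.lower title.toList)
            (PySem.Chars.lower input_title.toList)) := by
    intro input_title
    rw [Bool.eq_iff_iff, pv_A_iff, pv_B_iff]
  simp only [h]
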